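-- pv_equiv track=rewrite | github.com/fengttt/sip | ii/lcseq.py | buildtbl
-- ===== SOURCE A (Python) =====
-- def buildtbl(x, y, lenx, leny):
--     t = [[0 for i in range(leny + 1)] for j in range(lenx + 1)]
--     for i in range(lenx):
--         for j in range(leny):
--             if x[i] == y[j]:
--                 t[i+1][j+1] = t[i][j] + 1
--             else:
--                 t[i+1][j+1] = max(t[i][j+1], t[i+1][j])
--     return t
-- ===== SOURCE B (Python) =====
-- def buildtbl(x, y, lenx, leny):
--     memo = {}
--     get = memo.get
--
--     def lcs(i, j):
--         if i == 0 or j == 0: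
--             return 0
--         r = get((i, j))
--         if r is None:
--             if x[i - 1] == y[j - 1]:
--                 r = lcs(i - 1, j - 1) + 1
--             else:
--                 r = max(lcs(i - 1, j), lcs(i, j - 1))
--             memo[(i, j)] = r
--         return r
--
--     return [[lcs(i, j) for j in range(leny + 1)] for i in range(lenx + 1)]
-- ===== Notes on version B (the rewrite author's own statement) =====
-- stated objective: alternative
-- what changed: B replaces A's bottom-up double loop mutating a preallocated 2-D table by a top-down memoized recursion lcs(i,j) (dict memo, base case i==0 or j==0), with the table produced as a comprehension [[lcs(i,j) ...]] instead of index-addressed writes; Pre_ excludes only the inputs where A raises IndexError (lenx>len(x) or leny>len(y) with both counts positive), where B raises too.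
import Mathlib
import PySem

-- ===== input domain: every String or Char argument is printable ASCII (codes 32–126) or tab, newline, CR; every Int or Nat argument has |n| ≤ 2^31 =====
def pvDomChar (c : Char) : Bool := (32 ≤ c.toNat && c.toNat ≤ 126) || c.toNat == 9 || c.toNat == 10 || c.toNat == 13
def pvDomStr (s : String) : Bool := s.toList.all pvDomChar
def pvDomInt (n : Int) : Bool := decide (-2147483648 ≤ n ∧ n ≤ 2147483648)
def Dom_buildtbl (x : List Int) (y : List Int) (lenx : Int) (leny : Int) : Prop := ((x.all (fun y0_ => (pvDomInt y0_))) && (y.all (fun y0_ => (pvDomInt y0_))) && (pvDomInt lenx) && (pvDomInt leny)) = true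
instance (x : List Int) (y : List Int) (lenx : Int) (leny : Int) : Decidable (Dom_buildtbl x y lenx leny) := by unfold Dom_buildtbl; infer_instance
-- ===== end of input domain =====

-- B computes the same LCS table by top-down memoized recursion (a dict memo driven by a
-- comprehension) instead of A's bottom-up double loop over a preallocated mutable table;
-- same cost, a different decomposition.

-- ===== PORT A =====
-- t[i][j] (read): both indices produced by range(...) are nonnegative and in range under Pre_
def pyGet2 (t : List (List Int)) (i j : Int) : Int :=
  PySem.List.pyGetD (PySem.List.pyGetD t i []) j 0

-- t[i][j] = v (write): exact for the nonnegative in-range indices produced by range(...) here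
def pySet2 (t : List (List Int)) (i j : Int) (v : Int) : List (List Int) :=
  t.modify i.toNat (fun r => r.set j.toNat v)

def buildtbl (x : List Int) (y : List Int) (lenx : Int) (leny : Int) : List (List Int) :=
  let t0 := (PySem.List.pyRange 0 (lenx + 1) 1).map
      (fun _ => (PySem.List.pyRange 0 (leny + 1) 1).map (fun _ => (0 : Int)))
  (PySem.List.pyRange 0 lenx 1).foldl (fun t i =>
    (PySem.List.pyRange 0 leny 1).foldl (fun t j =>
      if PySem.List.pyGetD x i 0 = PySem.List.pyGetD y j 0 then
        pySet2 t (i + 1) (j + 1) (pyGet2 t i j + 1)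
      else
        pySet2 t (i + 1) (j + 1) (max (pyGet2 t i (j + 1)) (pyGet2 t (i + 1) j))) t) t0

-- ===== PORT B =====
-- lcs(i, j): memoized recursion; the memo dict is threaded through as state.
-- The fuel argument only makes the recursion structural (each call uses fuel i.toNat+j.toNat+1,
-- enough for the recursion, which decreases i+j); it changes no computed value.
def lcsGo (x y : List Int) : Nat → Int → Int → PySem.Dict (Int × Int) Int → Int × PySem.Dict (Int × Int) Int
  | 0, _, _, memo => (0, memo)
  | fuel + 1, i, j, memo =>
    if i = 0 ∨ j = 0 then (0, memo)
    else
      match PySem.Dict.get? memo (i, j) with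
      | some v => (v, memo)
      | none =>
        let p :=
          if PySem.List.pyGetD x (i - 1) 0 = PySem.List.pyGetD y (j - 1) 0 then
            ((lcsGo x y fuel (i - 1) (j - 1) memo).1 + 1, (lcsGo x y fuel (i - 1) (j - 1) memo).2)
          else
            (max (lcsGo x y fuel (i - 1) j memo).1
                 (lcsGo x y fuel i (j - 1) (lcsGo x y fuel (i - 1) j memo).2).1,
             (lcsGo x y fuel i (j - 1) (lcsGo x y fuel (i - 1) j memo).2).2)
        (p.1, PySem.Dict.insert p.2 (i, j) p.1)

-- the inner comprehension [lcs(i, j) for j in range(leny + 1)], threading the memo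
def bRow (x y : List Int) (i leny : Int) (memo : PySem.Dict (Int × Int) Int) :
    List Int × PySem.Dict (Int × Int) Int :=
  (PySem.List.pyRange 0 (leny + 1) 1).foldl
    (fun (st2 : List Int × PySem.Dict (Int × Int) Int) j =>
      ((st2.1 ++ [(lcsGo x y (i.toNat + j.toNat + 1) i j st2.2).1]),
       (lcsGo x y (i.toNat + j.toNat + 1) i j st2.2).2)) ([], memo)

def buildtbl_alt (x : List Int) (y : List Int) (lenx : Int) (leny : Int) : List (List Int) :=
  ((PySem.List.pyRange 0 (lenx + 1) 1).foldl
    (fun (st : List (List Int) × PySem.Dict (Int × Int) Int) i =>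
      (st.1 ++ [(bRow x y i leny st.2).1], (bRow x y i leny st.2).2))
    ([], PySem.Dict.empty)).1

-- ===== PRECONDITION & SPEC =====
-- Pre_ excludes exactly the inputs on which A raises IndexError: lenx > len(x) or leny > len(y)
-- while both counts are positive, so the loops actually index past the end (B raises there too).
def Pre_buildtbl (x : List Int) (y : List Int) (lenx : Int) (leny : Int) : Prop :=
  lenx ≤ 0 ∨ leny ≤ 0 ∨ (lenx ≤ x.length ∧ leny ≤ y.length)
instance (x : List Int) (y : List Int) (lenx : Int) (leny : Int) : Decidable (Pre_buildtbl x y lenx leny) := by unfold Pre_buildtbl; infer_instance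

def pvWitness_buildtbl : List Int × List Int × Int × Int := ([1, 2], [2, 1], 2, 2)

def Spec_buildtbl (x : List Int) (y : List Int) (lenx : Int) (leny : Int) (out : List (List Int)) : Prop := out = buildtbl_alt x y lenx leny
instance (x : List Int) (y : List Int) (lenx : Int) (leny : Int) (out : List (List Int)) : Decidable (Spec_buildtbl x y lenx leny out) := by unfold Spec_buildtbl; infer_instance

-- ===== CLAIM (what is proved, stated in full; the proofs are below) =====
def Claim_equal_buildtbl : Prop := ∀ (x : List Int) (y : List Int) (lenx : Int) (leny : Int), Dom_buildtbl x y lenx leny → Pre_buildtbl x y lenx leny → Spec_buildtbl x y lenx leny (buildtbl x y lenx leny)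

-- ===== LEMMAS AND PROOFS =====

-- the LCS recurrence as a pure function: the common specification of both programs
def lcsSpec (x y : List Int) : Nat → Nat → Int
  | 0, _ => 0
  | _ + 1, 0 => 0
  | i + 1, j + 1 =>
    if x.getD i 0 = y.getD j 0 then lcsSpec x y i j + 1
    else max (lcsSpec x y i (j + 1)) (lcsSpec x y (i + 1) j)
termination_by i j => i + j

theorem lcsSpec_zero_left (x y : List Int) (j : Nat) : lcsSpec x y 0 j = 0 := by
  cases j <;> simp [lcsSpec]

theorem lcsSpec_zero_right (x y : List Int) (i : Nat) : lcsSpec x y i 0 = 0 := by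
  cases i <;> simp [lcsSpec]

theorem lcsSpec_succ (x y : List Int) (i j : Nat) :
    lcsSpec x y (i + 1) (j + 1) =
      if x.getD i 0 = y.getD j 0 then lcsSpec x y i j + 1
      else max (lcsSpec x y i (j + 1)) (lcsSpec x y (i + 1) j) := by
  simp [lcsSpec]

-- row i of the canonical table
def rowL (x y : List Int) (i m : Nat) : List Int :=
  (List.range (m + 1)).map (fun j => lcsSpec x y i j)

theorem rowL_zero (x y : List Int) (m : Nat) : rowL x y 0 m = List.replicate (m + 1) 0 := by
  simp [rowL, lcsSpec_zero_left, List.map_const']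

theorem rowL_cells_zero (x y : List Int) (i : Nat) : rowL x y i 0 = [0] := by
  simp [rowL, lcsSpec_zero_right]

-- ==== A side ====

-- reference: the tail of the next DP row, consuming ys and the previous row in lockstep
def rowTail (xi : Int) : List Int → List Int → Int → List Int
  | yj :: ys', r0 :: r1 :: rs, left =>
      (if xi = yj then r0 + 1 else max r1 left) ::
        rowTail xi ys' (r1 :: rs) (if xi = yj then r0 + 1 else max r1 left)
  | _, _, _ => []

def nextRow (xi : Int) (ys row : List Int) : List Int := 0 :: rowTail xi ys row 0

-- the rows of the table after the first one
def refRowsFrom (ys : List Int) : List Int → List Int → List (List Int)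
  | _, [] => []
  | row, xi :: xs' => nextRow xi ys row :: refRowsFrom ys (nextRow xi ys row) xs'

theorem rowTail_length (xi : Int) : ∀ (ys row : List Int) (left : Int),
    row.length = ys.length + 1 → (rowTail xi ys row left).length = ys.length := by
  intro ys
  induction ys with
  | nil => intro row left _; rfl
  | cons yj ys' ih =>
      intro row left h
      match row with
      | r0 :: r1 :: rs =>
          simp only [rowTail, List.length_cons]
          rw [ih (r1 :: rs) _ (by simpa using h)]

theorem refRowsFrom_getLastD_length (ys : List Int) : ∀ (l : List Int) (row : List Int),
    row.length = ys.length + 1 →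
    ((refRowsFrom ys row l).getLastD row).length = ys.length + 1 := by
  intro l
  induction l with
  | nil => intro row h; simpa using h
  | cons a l' ih =>
      intro row h
      have hnr : (nextRow a ys row).length = ys.length + 1 := by
        simp [nextRow, rowTail_length a ys row 0 h]
      simp only [refRowsFrom, List.getLastD_cons]
      exact ih (nextRow a ys row) hnr

theorem refRowsFrom_snoc (ys : List Int) : ∀ (l : List Int) (a : Int) (row : List Int),
    refRowsFrom ys row (l ++ [a]) =
      refRowsFrom ys row l ++ [nextRow a ys ((refRowsFrom ys row l).getLastD row)] := by
  intro l
  induction l with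
  | nil => intro a row; simp [refRowsFrom]
  | cons b l' ih =>
      intro a row
      simp only [List.cons_append, refRowsFrom, List.getLastD_cons]
      rw [ih]

theorem refRowsFrom_length (ys : List Int) : ∀ (l row : List Int),
    (refRowsFrom ys row l).length = l.length := by
  intro l
  induction l with
  | nil => intro row; rfl
  | cons a l' ih => intro row; simp [refRowsFrom, ih]

-- list surgery helpers
theorem getD_append_cons {α : Type} (pre : List α) (v : α) (rest : List α) (d : α) :
    (pre ++ v :: rest).getD pre.length d = v := by
  induction pre with
  | nil => rfl
  | cons a p ih => simpa using ih

theorem set_append_cons {α : Type} (a : List α) (b0 : α) (bs : List α) (v : α) :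
    (a ++ b0 :: bs).set a.length v = a ++ v :: bs := by
  induction a with
  | nil => rfl
  | cons c cs ih => simpa using ih

theorem modify_append_cons {α : Type} (pre : List α) (v : α) (rest : List α) (f : α → α) :
    (pre ++ v :: rest).modify pre.length f = pre ++ f v :: rest := by
  induction pre with
  | nil => rfl
  | cons a p ih => simpa using ih

theorem getLast_cons_eq_getLastD {α : Type} (a : α) (l : List α) (h : a :: l ≠ []) :
    (a :: l).getLast h = l.getLastD a := by
  cases l with
  | nil => rfl
  | cons b l' =>
      rw [List.getLast_cons (by simp), List.getLastD_eq_getLast?,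
        List.getLast?_eq_getLast (l := b :: l') (by simp)]
      rfl

-- A side: inner-loop invariant
theorem A_inner (x y : List Int) (xi : Int) (iN : Nat)
    (hxi : PySem.List.pyGetD x (iN : Int) 0 = xi) :
    ∀ (yssuf : List Int) (k m : Nat) (f0 : Int) (fsuf finpre np : List Int)
      (left : Int) (pre rest : List (List Int)),
      finpre.length = k → np.length = k → pre.length = iN →
      fsuf.length = yssuf.length → k + yssuf.length = m →
      (∀ j : Nat, j < yssuf.length → y.getD (k + j) 0 = yssuf.getD j 0) →
      List.foldl (fun t (j : Int) =>
            if PySem.List.pyGetD x (iN : Int) 0 = PySem.List.pyGetD y j 0 then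
              pySet2 t ((iN : Int) + 1) (j + 1) (pyGet2 t (iN : Int) j + 1)
            else
              pySet2 t ((iN : Int) + 1) (j + 1)
                (max (pyGet2 t (iN : Int) (j + 1)) (pyGet2 t ((iN : Int) + 1) j)))
        (pre ++ (finpre ++ f0 :: fsuf) :: ((np ++ [left]) ++ List.replicate yssuf.length 0) :: rest)
        (PySem.List.pyRange (k : Int) (m : Int) 1)
      = pre ++ (finpre ++ f0 :: fsuf) ::
          ((np ++ [left]) ++ rowTail xi yssuf (f0 :: fsuf) left) :: rest := by
  intro yssuf
  induction yssuf with
  | nil =>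
      intro k m f0 fsuf finpre np left pre rest hf hnp hpre hlen hm hy
      have hge : (m : Int) ≤ (k : Int) := by
        have : m ≤ k := by simp at hm; omega
        exact_mod_cast this
      rw [PySem.List.pyRange_one_eq_nil hge]
      simp [rowTail]
  | cons yj ys' ih =>
      intro k m f0 fsuf finpre np left pre rest hf hnp hpre hlen hm hy
      match fsuf, hlen with
      | f1 :: fs, hlen =>
        simp only [List.length_cons]
        have hklt : (k : Int) < (m : Int) := by
          have : k < m := by simp at hm; omega
          exact_mod_cast this
        rw [PySem.List.pyRange_one_cons hklt, List.foldl_cons]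
        have hyj : PySem.List.pyGetD y (k : Int) 0 = yj := by
          have := hy 0 (by simp)
          simpa [PySem.List.pyGetD_natCast] using this
        have hcast1 : ((iN : Int) + 1) = ((iN + 1 : Nat) : Int) := by push_cast; ring
        have hcast2 : ((k : Int) + 1) = ((k + 1 : Nat) : Int) := by push_cast; ring
        -- reads
        have hread_diag : pyGet2 (pre ++ (finpre ++ f0 :: f1 :: fs) ::
              ((np ++ [left]) ++ List.replicate (ys'.length + 1) 0) :: rest) (iN : Int) (k : Int)
            = f0 := by
          simp only [pyGet2, PySem.List.pyGetD_natCast]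
          rw [← hpre, getD_append_cons, ← hf, getD_append_cons]
        have hread_up : pyGet2 (pre ++ (finpre ++ f0 :: f1 :: fs) ::
              ((np ++ [left]) ++ List.replicate (ys'.length + 1) 0) :: rest) (iN : Int) ((k : Int) + 1)
            = f1 := by
          simp only [pyGet2, hcast2, PySem.List.pyGetD_natCast]
          rw [← hpre, getD_append_cons]
          have : finpre ++ f0 :: f1 :: fs = (finpre ++ [f0]) ++ f1 :: fs := by simp
          rw [this]
          have hl : k + 1 = (finpre ++ [f0]).length := by simp [hf]
          rw [hl, getD_append_cons]
        have hread_left : pyGet2 (pre ++ (finpre ++ f0 :: f1 :: fs) ::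
              ((np ++ [left]) ++ List.replicate (ys'.length + 1) 0) :: rest) ((iN : Int) + 1) (k : Int)
            = left := by
          simp only [pyGet2, hcast1, PySem.List.pyGetD_natCast]
          have hsplit : pre ++ (finpre ++ f0 :: f1 :: fs) ::
              ((np ++ [left]) ++ List.replicate (ys'.length + 1) 0) :: rest
              = (pre ++ [finpre ++ f0 :: f1 :: fs]) ++
                ((np ++ [left]) ++ List.replicate (ys'.length + 1) 0) :: rest := by simp
          rw [hsplit]
          have hl : iN + 1 = (pre ++ [finpre ++ f0 :: f1 :: fs]).length := by simp [hpre]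
          rw [hl, getD_append_cons]
          have : (np ++ [left]) ++ List.replicate (ys'.length + 1) 0
              = np ++ left :: List.replicate (ys'.length + 1) 0 := by simp
          rw [this, ← hnp, getD_append_cons]
        -- the write
        have hwrite : (fun t (j : Int) =>
            if PySem.List.pyGetD x (iN : Int) 0 = PySem.List.pyGetD y j 0 then
              pySet2 t ((iN : Int) + 1) (j + 1) (pyGet2 t (iN : Int) j + 1)
            else
              pySet2 t ((iN : Int) + 1) (j + 1)
                (max (pyGet2 t (iN : Int) (j + 1)) (pyGet2 t ((iN : Int) + 1) j)))
            (pre ++ (finpre ++ f0 :: f1 :: fs) ::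
              ((np ++ [left]) ++ List.replicate (ys'.length + 1) 0) :: rest) (k : Int)
            = pre ++ (finpre ++ f0 :: f1 :: fs) ::
              (((np ++ [left]) ++ [if xi = yj then f0 + 1 else max f1 left]) ++
                List.replicate ys'.length 0) :: rest := by
          have hrep : List.replicate (ys'.length + 1) (0 : Int) = 0 :: List.replicate ys'.length 0 := rfl
          have hsetcur : ∀ v : Int, ((np ++ [left]) ++ List.replicate (ys'.length + 1) 0).set (k + 1) v
              = ((np ++ [left]) ++ [v]) ++ List.replicate ys'.length 0 := by
            intro v
            have hl : k + 1 = (np ++ [left]).length := by simp [hnp]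
            rw [hrep, hl, set_append_cons]; simp
          have hset : ∀ v : Int, pySet2 (pre ++ (finpre ++ f0 :: f1 :: fs) ::
                ((np ++ [left]) ++ List.replicate (ys'.length + 1) 0) :: rest)
                ((iN : Int) + 1) ((k : Int) + 1) v
              = pre ++ (finpre ++ f0 :: f1 :: fs) ::
                (((np ++ [left]) ++ [v]) ++ List.replicate ys'.length 0) :: rest := by
            intro v
            simp only [pySet2, hcast1, hcast2, Int.toNat_natCast]
            have hsplit : pre ++ (finpre ++ f0 :: f1 :: fs) ::
                ((np ++ [left]) ++ List.replicate (ys'.length + 1) 0) :: rest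
                = (pre ++ [finpre ++ f0 :: f1 :: fs]) ++
                  ((np ++ [left]) ++ List.replicate (ys'.length + 1) 0) :: rest := by simp
            rw [hsplit]
            have hl : iN + 1 = (pre ++ [finpre ++ f0 :: f1 :: fs]).length := by simp [hpre]
            rw [hl, modify_append_cons, hsetcur]
            simp
          simp only [hxi, hyj, hread_diag, hread_up, hread_left]
          by_cases hc : xi = yj
          · rw [if_pos hc, hset (f0 + 1), if_pos hc]
          · rw [if_neg hc, hset (max f1 left), if_neg hc]
        rw [show (ys' : List Int).length + 1 = (yj :: ys').length from rfl] at hwrite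
        simp only [List.length_cons] at hwrite ⊢
        rw [hwrite]
        have ihy : ∀ j : Nat, j < ys'.length → y.getD (k + 1 + j) 0 = ys'.getD j 0 := by
          intro j hj
          have := hy (j + 1) (by simpa using Nat.succ_lt_succ hj)
          simpa [Nat.add_assoc, Nat.add_comm 1 j] using this
        have := ih (k + 1) m f1 fs (finpre ++ [f0]) (np ++ [left])
          (if xi = yj then f0 + 1 else max f1 left) pre rest
          (by simp [hf]) (by simp [hnp]) hpre (by simpa using hlen)
          (by simp at hm ⊢; omega) ihy
        rw [← hcast2] at this
        simp only [List.append_assoc, List.cons_append, List.nil_append] at this ⊢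
        rw [this]
        simp [rowTail]

-- assembled A-side reference
theorem buildtbl_eq_ref (x y : List Int) (lenx leny : Int)
    (hx0 : 0 ≤ lenx) (hxlen : lenx ≤ x.length) (hy0 : 0 ≤ leny) (hylen : leny ≤ y.length) :
    buildtbl x y lenx leny =
      List.replicate (leny.toNat + 1) 0 ::
        refRowsFrom (y.take leny.toNat) (List.replicate (leny.toNat + 1) 0) (x.take lenx.toNat) := by
  set n := lenx.toNat with hn
  set m := leny.toNat with hm
  have hlx : lenx = (n : Int) := (Int.toNat_of_nonneg hx0).symm
  have hly : leny = (m : Int) := (Int.toNat_of_nonneg hy0).symm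
  have hnx : n ≤ x.length := by omega
  have hmy : m ≤ y.length := by omega
  set ys := y.take m with hys
  set row0 : List Int := List.replicate (m + 1) 0 with hrow0
  have ht0 : (PySem.List.pyRange 0 (lenx + 1) 1).map
      (fun _ => (PySem.List.pyRange 0 (leny + 1) 1).map (fun _ => (0 : Int)))
      = List.replicate (n + 1) row0 := by
    have h1 : (PySem.List.pyRange 0 (leny + 1) 1).map (fun _ => (0 : Int))
        = List.replicate (m + 1) 0 := by
      rw [List.map_const']
      congr 1
      rw [PySem.List.length_pyRange_one]
      omega
    rw [h1, List.map_const']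
    congr 1
    rw [PySem.List.length_pyRange_one]
    omega
  unfold buildtbl
  simp only [ht0]
  rw [hlx, hly]
  rw [PySem.List.pyRange_one 0 (n : Int), List.foldl_map]
  have hsub : (((n : Int)) - 0).toNat = n := by omega
  rw [hsub]
  suffices hgen : ∀ i : Nat, i ≤ n →
      List.foldl (fun t (k : Nat) =>
        (fun t (i : Int) =>
          (PySem.List.pyRange 0 (m : Int) 1).foldl (fun t j =>
            if PySem.List.pyGetD x i 0 = PySem.List.pyGetD y j 0 then
              pySet2 t (i + 1) (j + 1) (pyGet2 t i j + 1)
            else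
              pySet2 t (i + 1) (j + 1)
                (max (pyGet2 t i (j + 1)) (pyGet2 t (i + 1) j))) t) t ((0 : Int) + (k : Int)))
        (List.replicate (n + 1) row0) (List.range i)
      = (row0 :: refRowsFrom ys row0 (x.take i)) ++ List.replicate (n - i) row0 by
    have := hgen n (le_refl n)
    simpa using this
  intro i
  induction i with
  | zero => intro _; simp [refRowsFrom, List.replicate_succ]
  | succ i ih =>
      intro hi
      have hi' : i ≤ n := Nat.le_of_succ_le hi
      rw [List.range_succ, List.foldl_append, ih hi', List.foldl_cons, List.foldl_nil]
      set R := refRowsFrom ys row0 (x.take i) with hR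
      have hRlen' : (x.take i).length = i := by simp [List.length_take]; omega
      have hRlen : R.length = i := by rw [hR, refRowsFrom_length]; exact hRlen'
      have hyslen : ys.length = m := by simp [hys, List.length_take, Nat.min_eq_left hmy]
      set fin := R.getLastD row0 with hfin
      have hfinlen : fin.length = m + 1 := by
        rw [hfin, hR]
        have h1 := refRowsFrom_getLastD_length ys (x.take i) row0
          (by rw [hrow0, hyslen]; simp)
        rw [hyslen] at h1
        exact h1
      have hdecomp : row0 :: R = (row0 :: R).dropLast ++ [fin] := by
        have hne : row0 :: R ≠ [] := by simp
        conv_lhs => rw [← List.dropLast_append_getLast hne]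
        rw [getLast_cons_eq_getLastD]
      have hprelen : ((row0 :: R).dropLast).length = i := by
        simp [List.length_dropLast, hRlen]
      have hrepl : List.replicate (n - i) row0 = row0 :: List.replicate (n - i - 1) row0 := by
        rw [← List.replicate_succ]
        congr 1
        omega
      obtain ⟨f0, fsuf, hfeq⟩ : ∃ f0 fsuf, fin = f0 :: fsuf := by
        cases hfc : fin with
        | nil => rw [hfc] at hfinlen; simp at hfinlen
        | cons a l => exact ⟨a, l, rfl⟩
      have hfsuflen : fsuf.length = m := by
        rw [hfeq] at hfinlen; simpa using hfinlen
      have hyget : ∀ j : Nat, j < ys.length → y.getD (0 + j) 0 = ys.getD j 0 := by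
        intro j hj
        have hj' : j < m := by rw [hyslen] at hj; exact hj
        simp only [Nat.zero_add, hys, List.getD]
        rw [List.getElem?_take_of_lt hj']
      have hxi : PySem.List.pyGetD x ((i : Nat) : Int) 0 = x.getD i 0 := by
        simp [PySem.List.pyGetD_natCast]
      set xi := x.getD i 0 with hxiv
      have hmain := A_inner x y xi i hxi ys 0 m f0 fsuf [] [] 0
        ((row0 :: R).dropLast) (List.replicate (n - i - 1) row0)
        rfl rfl hprelen (by rw [hfsuflen, hyslen]) (by simpa using hyslen) hyget
      simp only [List.nil_append, Nat.cast_zero] at hmain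
      have hrow0' : row0 = ([(0 : Int)] ++ List.replicate ys.length 0) := by
        rw [hyslen, hrow0]
        rfl
      have hstate : (row0 :: R) ++ List.replicate (n - i) row0
          = ((row0 :: R).dropLast ++ (f0 :: fsuf) ::
              ([(0:Int)] ++ List.replicate ys.length 0) :: List.replicate (n - i - 1) row0) := by
        rw [hrepl]
        conv_lhs => rw [hdecomp]
        rw [hfeq, ← hrow0']
        simp
      beta_reduce
      simp only [zero_add]
      rw [hstate, hmain]
      have htake : x.take (i + 1) = x.take i ++ [xi] := by
        rw [List.take_succ]
        congr 1
        have hilt : i < x.length := by omega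
        simp [List.getElem?_eq_getElem hilt, hxiv, List.getD,
          List.getElem?_eq_getElem hilt]
      rw [htake, refRowsFrom_snoc, ← hR, ← hfin]
      have hrhs : row0 :: (R ++ [nextRow xi ys fin]) ++ List.replicate (n - (i + 1)) row0
          = (row0 :: R).dropLast ++ (f0 :: fsuf) ::
            (nextRow xi ys fin) :: List.replicate (n - i - 1) row0 := by
        have hns : n - (i + 1) = n - i - 1 := by omega
        rw [hns]
        conv_lhs => rw [show row0 :: (R ++ [nextRow xi ys fin]) ++ List.replicate (n - i - 1) row0
            = (row0 :: R) ++ nextRow xi ys fin :: List.replicate (n - i - 1) row0 by simp]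
        rw [hdecomp, hfeq]
        simp
      rw [hrhs, hfeq]
      simp [nextRow]

-- A with leny ≤ 0: the inner loop body never runs
theorem A_degen (x y : List Int) (leny : Int) (h : leny ≤ 0) :
    ∀ (l : List Int) (t : List (List Int)),
      List.foldl (fun t (i : Int) =>
        (PySem.List.pyRange 0 leny 1).foldl (fun t j =>
          if PySem.List.pyGetD x i 0 = PySem.List.pyGetD y j 0 then
            pySet2 t (i + 1) (j + 1) (pyGet2 t i j + 1)
          else
            pySet2 t (i + 1) (j + 1)
              (max (pyGet2 t i (j + 1)) (pyGet2 t (i + 1) j))) t) t l = t := by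
  have hnil : PySem.List.pyRange 0 leny 1 = [] := PySem.List.pyRange_one_eq_nil h
  intro l
  induction l with
  | nil => intro t; rfl
  | cons a l' ih =>
      intro t
      simp only [List.foldl_cons, hnil, List.foldl_nil]
      have h3 := ih t
      simp only [hnil, List.foldl_nil] at h3
      exact h3

-- bridge: the reference rows are the canonical lcsSpec rows
theorem take_eq_map_range_getD (l : List Int) (m : Nat) (h : m ≤ l.length) :
    l.take m = (List.range m).map (fun t => l.getD t 0) := by
  apply List.ext_getElem
  · simp [List.length_take]; omega
  · intro t h1 h2
    have ht : t < m := by simp at h2; omega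
    have htl : t < l.length := by omega
    simp [List.getElem_take, List.getD, List.getElem?_eq_getElem htl]

theorem map_range_succ_cons {a : Type} (f : Nat → a) (n : Nat) :
    (List.range (n + 1)).map f = f 0 :: (List.range n).map (fun t => f (t + 1)) := by
  rw [List.range_succ_eq_map, List.map_cons, List.map_map]
  rfl

theorem rowTail_L (x y : List Int) (iN : Nat) :
    ∀ (seg jN : Nat),
      rowTail (x.getD iN 0) ((List.range seg).map (fun t => y.getD (jN + t) 0))
        ((List.range (seg + 1)).map (fun t => lcsSpec x y iN (jN + t)))
        (lcsSpec x y (iN + 1) jN)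
      = (List.range seg).map (fun t => lcsSpec x y (iN + 1) (jN + 1 + t)) := by
  intro seg
  induction seg with
  | zero => intro jN; simp [rowTail]
  | succ seg ih =>
      intro jN
      rw [map_range_succ_cons (fun t => y.getD (jN + t) 0) seg,
        map_range_succ_cons (fun t => lcsSpec x y iN (jN + t)) (seg + 1),
        map_range_succ_cons (fun t => lcsSpec x y iN (jN + (t + 1))) seg,
        map_range_succ_cons (fun t => lcsSpec x y (iN + 1) (jN + 1 + t)) seg]
      simp only [rowTail, Nat.add_zero, Nat.zero_add]
      have hhead : (if x.getD iN 0 = y.getD jN 0 then lcsSpec x y iN jN + 1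
          else max (lcsSpec x y iN (jN + (0 + 1))) (lcsSpec x y (iN + 1) jN))
          = lcsSpec x y (iN + 1) (jN + 1) := by
        rw [lcsSpec_succ]
      rw [hhead]
      congr 1
      have hih := ih (jN + 1)
      rw [map_range_succ_cons (fun t => lcsSpec x y iN (jN + 1 + t)) seg] at hih
      simp only [Nat.add_zero] at hih
      have e1 : (fun t => y.getD (jN + (t + 1)) 0) = (fun t => y.getD (jN + 1 + t) 0) := by
        funext t; congr 1; omega
      have e2 : (fun t => lcsSpec x y iN (jN + (t + 1 + 1))) =
          (fun t => lcsSpec x y iN (jN + 1 + (t + 1))) := by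
        funext t; congr 1; omega
      have e3 : (fun t => lcsSpec x y (iN + 1) (jN + 1 + (t + 1))) =
          (fun t => lcsSpec x y (iN + 1) (jN + 1 + 1 + t)) := by
        funext t; congr 1; omega
      rw [e1, e2, e3]
      exact hih

theorem nextRow_L (x y : List Int) (iN m : Nat) (hmy : m ≤ y.length) :
    nextRow (x.getD iN 0) (y.take m) (rowL x y iN m) = rowL x y (iN + 1) m := by
  unfold nextRow rowL
  rw [take_eq_map_range_getD y m hmy]
  have h0 : (lcsSpec x y (iN + 1) 0) = 0 := lcsSpec_zero_right x y (iN + 1)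
  have htl := rowTail_L x y iN m 0
  simp only [Nat.zero_add] at htl
  rw [h0] at htl
  rw [htl]
  rw [map_range_succ_cons (fun j => lcsSpec x y (iN + 1) j) m]
  rw [lcsSpec_zero_right]
  congr 1
  refine List.map_congr_left ?_
  intro t _
  congr 1
  omega

theorem refRows_L (x y : List Int) (m : Nat) (hmy : m ≤ y.length) :
    ∀ (seg kN : Nat),
      refRowsFrom (y.take m) (rowL x y kN m) ((List.range seg).map (fun t => x.getD (kN + t) 0))
      = (List.range seg).map (fun t => rowL x y (kN + 1 + t) m) := by
  intro seg
  induction seg with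
  | zero => intro kN; simp [refRowsFrom]
  | succ seg ih =>
      intro kN
      rw [map_range_succ_cons (fun t => x.getD (kN + t) 0) seg,
        map_range_succ_cons (fun t => rowL x y (kN + 1 + t) m) seg]
      simp only [refRowsFrom, Nat.add_zero]
      rw [nextRow_L x y kN m hmy]
      congr 1
      have hih := ih (kN + 1)
      have e1 : (fun t => x.getD (kN + (t + 1)) 0) = (fun t => x.getD (kN + 1 + t) 0) := by
        funext t; congr 1; omega
      have e2 : (fun t => rowL x y (kN + 1 + (t + 1)) m) =
          (fun t => rowL x y (kN + 1 + 1 + t) m) := by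
        funext t; congr 1; omega
      rw [e1, e2]
      exact hih

-- A equals the canonical table on the main region
theorem A_eq_table (x y : List Int) (lenx leny : Int)
    (hx0 : 0 ≤ lenx) (hxlen : lenx ≤ x.length) (hy0 : 0 ≤ leny) (hylen : leny ≤ y.length) :
    buildtbl x y lenx leny =
      (List.range (lenx.toNat + 1)).map (fun i => rowL x y i leny.toNat) := by
  have hnx : lenx.toNat ≤ x.length := by omega
  have hmy : leny.toNat ≤ y.length := by omega
  rw [buildtbl_eq_ref x y lenx leny hx0 hxlen hy0 hylen]
  rw [← rowL_zero x y leny.toNat]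
  have htk : x.take lenx.toNat = (List.range lenx.toNat).map (fun t => x.getD t 0) :=
    take_eq_map_range_getD x lenx.toNat hnx
  have hx' : (List.range lenx.toNat).map (fun t => x.getD t 0)
      = (List.range lenx.toNat).map (fun t => x.getD (0 + t) 0) := by
    refine List.map_congr_left ?_
    intro t _
    congr 2
    omega
  rw [htk, hx', refRows_L x y leny.toNat hmy lenx.toNat 0]
  rw [map_range_succ_cons (fun i => rowL x y i leny.toNat) lenx.toNat]
  rw [rowL_zero]
  congr 1
  refine List.map_congr_left ?_
  intro t _
  congr 1
  omega

-- ==== B side: memoized recursion correctness ====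

def GoodMemo (x y : List Int) (memo : PySem.Dict (Int × Int) Int) : Prop :=
  ∀ (i j v : Int), PySem.Dict.get? memo (i, j) = some v → v = lcsSpec x y i.toNat j.toNat

theorem goodMemo_empty (x y : List Int) : GoodMemo x y PySem.Dict.empty := by
  intro i j v h
  simp [PySem.Dict.get?_empty] at h

theorem lcsGo_some (x y : List Int) (fuel : Nat) (i j v : Int)
    (memo : PySem.Dict (Int × Int) Int)
    (hnb : ¬(i = 0 ∨ j = 0)) (hget : PySem.Dict.get? memo (i, j) = some v) :
    lcsGo x y (fuel + 1) i j memo = (v, memo) := by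
  rw [lcsGo, if_neg hnb, hget]

theorem lcsGo_match (x y : List Int) (fuel : Nat) (i j : Int)
    (memo : PySem.Dict (Int × Int) Int)
    (hnb : ¬(i = 0 ∨ j = 0)) (hget : PySem.Dict.get? memo (i, j) = none)
    (hc : PySem.List.pyGetD x (i - 1) 0 = PySem.List.pyGetD y (j - 1) 0) :
    lcsGo x y (fuel + 1) i j memo =
      ((lcsGo x y fuel (i - 1) (j - 1) memo).1 + 1,
        PySem.Dict.insert (lcsGo x y fuel (i - 1) (j - 1) memo).2 (i, j)
          ((lcsGo x y fuel (i - 1) (j - 1) memo).1 + 1)) := by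
  rw [lcsGo, if_neg hnb, hget]
  simp only [if_pos hc]

theorem lcsGo_mismatch (x y : List Int) (fuel : Nat) (i j : Int)
    (memo : PySem.Dict (Int × Int) Int)
    (hnb : ¬(i = 0 ∨ j = 0)) (hget : PySem.Dict.get? memo (i, j) = none)
    (hc : ¬ PySem.List.pyGetD x (i - 1) 0 = PySem.List.pyGetD y (j - 1) 0) :
    lcsGo x y (fuel + 1) i j memo =
      (max (lcsGo x y fuel (i - 1) j memo).1
           (lcsGo x y fuel i (j - 1) (lcsGo x y fuel (i - 1) j memo).2).1,
        PySem.Dict.insert (lcsGo x y fuel i (j - 1) (lcsGo x y fuel (i - 1) j memo).2).2 (i, j)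
          (max (lcsGo x y fuel (i - 1) j memo).1
               (lcsGo x y fuel i (j - 1) (lcsGo x y fuel (i - 1) j memo).2).1)) := by
  rw [lcsGo, if_neg hnb, hget]
  simp only [if_neg hc]

theorem goodMemo_insert (x y : List Int) (m' : PySem.Dict (Int × Int) Int) (i j r : Int)
    (hg : GoodMemo x y m') (hr : r = lcsSpec x y i.toNat j.toNat) :
    GoodMemo x y (PySem.Dict.insert m' (i, j) r) := by
  intro i' j' v' hget'
  by_cases hk : ((i', j') : Int × Int) = (i, j)
  · injection hk with h1 h2
    subst h1; subst h2
    rw [PySem.Dict.get?_insert_self] at hget'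
    cases hget'
    exact hr
  · rw [PySem.Dict.get?_insert_of_ne _ _ hk] at hget'
    exact hg i' j' v' hget'

theorem lcsGo_correct (x y : List Int) :
    ∀ (fuel : Nat) (i j : Int) (memo : PySem.Dict (Int × Int) Int),
      0 ≤ i → 0 ≤ j → i.toNat + j.toNat < fuel → GoodMemo x y memo →
      (lcsGo x y fuel i j memo).1 = lcsSpec x y i.toNat j.toNat ∧
        GoodMemo x y (lcsGo x y fuel i j memo).2 := by
  intro fuel
  induction fuel with
  | zero => intro i j memo _ _ hlt _; omega
  | succ fuel ih =>
      intro i j memo hi hj hlt hgood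
      by_cases hbase : i = 0 ∨ j = 0
      · have hz : lcsSpec x y i.toNat j.toNat = 0 := by
          rcases hbase with h | h
          · subst h; exact lcsSpec_zero_left x y j.toNat
          · subst h; exact lcsSpec_zero_right x y i.toNat
        simp only [lcsGo, if_pos hbase]
        exact ⟨hz.symm, hgood⟩
      · have hi1 : 1 ≤ i := by omega
        have hj1 : 1 ≤ j := by omega
        have hia : i.toNat = (i - 1).toNat + 1 := by omega
        have hjb : j.toNat = (j - 1).toNat + 1 := by omega
        have hxr : PySem.List.pyGetD x (i - 1) 0 = x.getD (i - 1).toNat 0 :=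
          PySem.List.pyGetD_of_nonneg x 0 (by omega)
        have hyr : PySem.List.pyGetD y (j - 1) 0 = y.getD (j - 1).toNat 0 :=
          PySem.List.pyGetD_of_nonneg y 0 (by omega)
        have hspec : lcsSpec x y i.toNat j.toNat =
            if x.getD (i - 1).toNat 0 = y.getD (j - 1).toNat 0 then
              lcsSpec x y (i - 1).toNat (j - 1).toNat + 1
            else max (lcsSpec x y (i - 1).toNat ((j - 1).toNat + 1))
                (lcsSpec x y ((i - 1).toNat + 1) (j - 1).toNat) := by
          rw [hia, hjb, lcsSpec_succ]
        cases hget : PySem.Dict.get? memo (i, j) with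
        | some v =>
            rw [lcsGo_some x y fuel i j v memo hbase hget]
            exact ⟨hgood i j v hget, hgood⟩
        | none =>
            by_cases hc : PySem.List.pyGetD x (i - 1) 0 = PySem.List.pyGetD y (j - 1) 0
            · have h1 := ih (i - 1) (j - 1) memo (by omega) (by omega) (by omega) hgood
              rw [lcsGo_match x y fuel i j memo hbase hget hc]
              have hval : (lcsGo x y fuel (i - 1) (j - 1) memo).1 + 1
                  = lcsSpec x y i.toNat j.toNat := by
                rw [h1.1, hspec, if_pos (by rw [hxr, hyr] at hc; exact hc)]
              exact ⟨hval, goodMemo_insert x y _ i j _ h1.2 hval⟩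
            · have h1 := ih (i - 1) j memo (by omega) hj (by omega) hgood
              have h2 := ih i (j - 1) (lcsGo x y fuel (i - 1) j memo).2
                hi (by omega) (by omega) h1.2
              rw [lcsGo_mismatch x y fuel i j memo hbase hget hc]
              have hval : max (lcsGo x y fuel (i - 1) j memo).1
                  (lcsGo x y fuel i (j - 1) (lcsGo x y fuel (i - 1) j memo).2).1
                  = lcsSpec x y i.toNat j.toNat := by
                rw [h1.1, h2.1, hspec, if_neg (by rw [hxr, hyr] at hc; exact hc)]
                congr 2 <;> omega
              exact ⟨hval, goodMemo_insert x y _ i j _ h2.2 hval⟩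

-- the inner comprehension builds row i and keeps the memo good
theorem bRow_fold (x y : List Int) (iN : Nat) :
    ∀ (c : Nat) (memo : PySem.Dict (Int × Int) Int) (acc : List Int), GoodMemo x y memo →
      (List.foldl (fun (st2 : List Int × PySem.Dict (Int × Int) Int) (k : Nat) =>
          ((st2.1 ++ [(lcsGo x y (((iN : Int)).toNat + ((k : Int)).toNat + 1) (iN : Int) (k : Int) st2.2).1]),
           (lcsGo x y (((iN : Int)).toNat + ((k : Int)).toNat + 1) (iN : Int) (k : Int) st2.2).2))
        (acc, memo) (List.range c)).1
        = acc ++ (List.range c).map (fun j => lcsSpec x y iN j) ∧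
      GoodMemo x y
        (List.foldl (fun (st2 : List Int × PySem.Dict (Int × Int) Int) (k : Nat) =>
          ((st2.1 ++ [(lcsGo x y (((iN : Int)).toNat + ((k : Int)).toNat + 1) (iN : Int) (k : Int) st2.2).1]),
           (lcsGo x y (((iN : Int)).toNat + ((k : Int)).toNat + 1) (iN : Int) (k : Int) st2.2).2))
        (acc, memo) (List.range c)).2 := by
  intro c
  induction c with
  | zero => intro memo acc h; exact ⟨by simp, h⟩
  | succ c ih =>
      intro memo acc h
      rw [List.range_succ, List.foldl_append, List.foldl_cons, List.foldl_nil]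
      obtain ⟨h1, h2⟩ := ih memo acc h
      have hcall := lcsGo_correct x y ((iN : Int).toNat + ((c : Int)).toNat + 1)
        (iN : Int) (c : Int) _ (by positivity) (by positivity) (by simp) h2
      constructor
      · simp only [h1]
        rw [List.map_append]
        simpa using hcall.1
      · exact hcall.2

theorem bRow_spec (x y : List Int) (iN : Nat) (leny : Int) (hy : 0 ≤ leny)
    (memo : PySem.Dict (Int × Int) Int) (h : GoodMemo x y memo) :
    (bRow x y (iN : Int) leny memo).1 = rowL x y iN leny.toNat ∧
      GoodMemo x y (bRow x y (iN : Int) leny memo).2 := by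
  unfold bRow
  rw [PySem.List.pyRange_one 0 (leny + 1), List.foldl_map]
  have hsub : (leny + 1 - 0).toNat = leny.toNat + 1 := by omega
  rw [hsub]
  simp only [zero_add]
  exact bRow_fold x y iN (leny.toNat + 1) memo [] h

-- the outer comprehension builds the rows and keeps the memo good
theorem bTbl_fold (x y : List Int) (leny : Int) (hy : 0 ≤ leny) :
    ∀ (r : Nat) (memo : PySem.Dict (Int × Int) Int) (acc : List (List Int)), GoodMemo x y memo →
      (List.foldl (fun (st : List (List Int) × PySem.Dict (Int × Int) Int) (k : Nat) =>
          (st.1 ++ [(bRow x y (k : Int) leny st.2).1], (bRow x y (k : Int) leny st.2).2))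
        (acc, memo) (List.range r)).1
        = acc ++ (List.range r).map (fun i => rowL x y i leny.toNat) ∧
      GoodMemo x y
        (List.foldl (fun (st : List (List Int) × PySem.Dict (Int × Int) Int) (k : Nat) =>
          (st.1 ++ [(bRow x y (k : Int) leny st.2).1], (bRow x y (k : Int) leny st.2).2))
        (acc, memo) (List.range r)).2 := by
  intro r
  induction r with
  | zero => intro memo acc h; exact ⟨by simp, h⟩
  | succ r ih =>
      intro memo acc h
      rw [List.range_succ, List.foldl_append, List.foldl_cons, List.foldl_nil]
      obtain ⟨h1, h2⟩ := ih memo acc h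
      have hrow := bRow_spec x y r leny hy _ h2
      constructor
      · simp only [h1]
        rw [List.map_append]
        simpa using hrow.1
      · exact hrow.2

theorem buildtbl_alt_eq (x y : List Int) (lenx leny : Int) (hx : 0 ≤ lenx) (hy : 0 ≤ leny) :
    buildtbl_alt x y lenx leny =
      (List.range (lenx.toNat + 1)).map (fun i => rowL x y i leny.toNat) := by
  unfold buildtbl_alt
  rw [PySem.List.pyRange_one 0 (lenx + 1), List.foldl_map]
  have hsub : (lenx + 1 - 0).toNat = lenx.toNat + 1 := by omega
  rw [hsub]
  simp only [zero_add]
  exact (bTbl_fold x y leny hy (lenx.toNat + 1) PySem.Dict.empty [] (goodMemo_empty x y)).1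

-- B with leny < 0: every row is empty
theorem bRow_degen (x y : List Int) (i leny : Int) (hy : leny < 0)
    (memo : PySem.Dict (Int × Int) Int) : bRow x y i leny memo = ([], memo) := by
  unfold bRow
  rw [PySem.List.pyRange_one_eq_nil (by omega)]
  rfl

theorem bTbl_degen (x y : List Int) (leny : Int) (hy : leny < 0) :
    ∀ (l : List Int) (memo : PySem.Dict (Int × Int) Int) (acc : List (List Int)),
      (List.foldl (fun (st : List (List Int) × PySem.Dict (Int × Int) Int) i =>
          (st.1 ++ [(bRow x y i leny st.2).1], (bRow x y i leny st.2).2))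
        (acc, memo) l).1 = acc ++ List.replicate l.length [] := by
  intro l
  induction l with
  | nil => intro memo acc; simp
  | cons a l' ih =>
      intro memo acc
      rw [List.foldl_cons, bRow_degen x y a leny hy memo]
      have := ih memo (acc ++ [[]])
      simp only [List.append_assoc] at this ⊢
      rw [this]
      simp [List.replicate_succ]

-- ===== VERDICT (by name: the statement is the Claim_ definition above) =====
theorem buildtbl_spec : Claim_equal_buildtbl := by
  intro x y lenx leny _ hpre
  unfold Spec_buildtbl
  by_cases hneg : lenx < 0
  · -- lenx < 0: no rows on either side
    unfold buildtbl buildtbl_alt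
    rw [PySem.List.pyRange_one_eq_nil (show lenx + 1 ≤ 0 by omega),
      PySem.List.pyRange_one_eq_nil (show lenx ≤ 0 by omega)]
    rfl
  · have hx0 : 0 ≤ lenx := not_lt.mp hneg
    by_cases hyneg : leny < 0
    · -- leny < 0: a table of (lenx+1) empty rows on both sides
      unfold buildtbl buildtbl_alt
      rw [A_degen x y leny (le_of_lt hyneg)]
      rw [bTbl_degen x y leny hyneg (PySem.List.pyRange 0 (lenx + 1) 1) PySem.Dict.empty []]
      have hrow : (PySem.List.pyRange 0 (leny + 1) 1).map (fun _ => (0 : Int)) = [] := by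
        rw [PySem.List.pyRange_one_eq_nil (by omega)]
        rfl
      rw [hrow, List.map_const']
      simp
    · have hy0 : 0 ≤ leny := not_lt.mp hyneg
      rw [buildtbl_alt_eq x y lenx leny hx0 hy0]
      rcases hpre with hxz | hyz | ⟨hbx, hby⟩
      · -- lenx = 0: A's loop never runs; single zero row
        have hxx : lenx = 0 := le_antisymm hxz hx0
        subst hxx
        unfold buildtbl
        rw [PySem.List.pyRange_one_eq_nil (le_refl (0 : Int))]
        simp only [List.foldl_nil]
        rw [show ((0 : Int) + 1) = ((1 : Nat) : Int) by norm_num,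
          PySem.List.pyRange_one 0 ((1 : Nat) : Int)]
        have h1 : (((1 : Nat) : Int) - 0).toNat = 1 := by omega
        rw [h1]
        simp only [List.range_one, List.map_cons, List.map_nil]
        rw [List.map_const', PySem.List.length_pyRange_one]
        have h2 : (leny + 1 - 0).toNat = leny.toNat + 1 := by omega
        rw [h2]
        have h3 : (0 : Int).toNat = 0 := rfl
        rw [h3]
        simp [List.range_one, rowL_zero]
      · -- leny = 0: A's inner loop never runs; every row is [0]
        have hyy : leny = 0 := le_antisymm hyz hy0
        subst hyy
        unfold buildtbl
        rw [A_degen x y 0 (le_refl 0)]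
        have hrow : (PySem.List.pyRange 0 ((0 : Int) + 1) 1).map (fun _ => (0 : Int)) = [0] := by
          rw [List.map_const', PySem.List.length_pyRange_one]
          rfl
        rw [hrow, List.map_const', PySem.List.length_pyRange_one]
        have h2 : (lenx + 1 - 0).toNat = lenx.toNat + 1 := by omega
        rw [h2]
        have h3 : (0 : Int).toNat = 0 := rfl
        rw [h3]
        have : (List.range (lenx.toNat + 1)).map (fun i => rowL x y i 0)
            = (List.range (lenx.toNat + 1)).map (fun _ => ([0] : List Int)) := by
          congr 1
          funext i
          exact rowL_cells_zero x y i
        rw [this, List.map_const', List.length_range]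
      · -- main region
        rw [A_eq_table x y lenx leny hx0 hbx hy0 hby]
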